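-- pv_equiv track=rewrite | github.com/yvoawk/CASPER | utils/generate_simple_events.py | separate_prefix
-- ===== SOURCE A (Python) =====
-- from typing import List
--
-- def separate_prefix(statement: str) -> tuple[str, str]:
--     prefix_lines: List[str] = []
--     core_lines: List[str] = []
--     found_content = False
--     for line in statement.splitlines(keepends=True):
--         stripped = line.strip()
--         if not found_content and (not stripped or stripped.startswith("%")):
--             prefix_lines.append(line)
--             continue
--         found_content = True
--         core_lines.append(line)
--     return "".join(prefix_lines), "".join(core_lines)
-- ===== SOURCE B (Python) =====
-- def separate_prefix(statement: str) -> tuple[str, str]: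
--     # Walk the raw string once, tracking the character index j of the prefix
--     # boundary; return two slices of the original (no splitlines, no join).
--     n = len(statement)
--     j = 0
--     while j < n:
--         e = j
--         while e < n and statement[e] != '\n' and statement[e] != '\r':
--             e += 1
--         if e < n:
--             e += 2 if statement[e] == '\r' and e + 1 < n and statement[e + 1] == '\n' else 1
--         s = statement[j:e].strip()
--         if s and not s.startswith('%'):
--             break
--         j = e
--     return statement[:j], statement[j:]
-- ===== Notes on version B (the rewrite author's own statement) =====
-- stated objective: alternative
-- what changed: B never builds a line list or joins buckets: it walks the raw string with a character index, advancing past each blank/comment line found by an inner scan for the line terminator, and returns the two slices of the original string at the resulting boundary index.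
import Mathlib
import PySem

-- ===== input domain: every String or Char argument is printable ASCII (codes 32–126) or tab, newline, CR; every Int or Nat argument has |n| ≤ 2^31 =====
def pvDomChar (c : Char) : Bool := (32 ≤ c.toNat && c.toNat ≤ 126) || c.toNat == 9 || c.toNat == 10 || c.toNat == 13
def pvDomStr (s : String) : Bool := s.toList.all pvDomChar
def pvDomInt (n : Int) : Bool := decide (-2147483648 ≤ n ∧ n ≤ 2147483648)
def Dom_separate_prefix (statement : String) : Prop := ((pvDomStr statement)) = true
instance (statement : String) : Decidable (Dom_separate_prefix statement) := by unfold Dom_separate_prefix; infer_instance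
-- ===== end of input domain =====

-- B never builds a line list: it walks the raw string tracking the character index of the
-- prefix boundary and returns two slices of the original string (objective: alternative).

-- ===== PORT A =====
-- statement.splitlines(keepends=True); exact on Dom, where the only possible line
-- boundaries are '\n', '\r' and '\r\n' (Dom admits no \x0b/\x0c/… characters)
def splitKeepends : List Char → List Char → List (List Char)
  | [], cur => if cur.isEmpty then [] else [cur.reverse]
  | '\r' :: '\n' :: rest, cur => ('\n' :: '\r' :: cur).reverse :: splitKeepends rest []
  | '\n' :: rest, cur => ('\n' :: cur).reverse :: splitKeepends rest []
  | '\r' :: rest, cur => ('\r' :: cur).reverse :: splitKeepends rest []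
  | c :: rest, cur => splitKeepends rest (c :: cur)

def sepStep (st : List (List Char) × List (List Char) × Bool) (line : List Char) :
    List (List Char) × List (List Char) × Bool :=
  let (pre, core, found) := st
  let stripped := PySem.Chars.strip line
  if !found && (stripped.isEmpty || PySem.Chars.startswith stripped ['%']) then
    (pre ++ [line], core, found)
  else
    (pre, core ++ [line], true)

def separate_prefix (statement : String) : String × String :=
  let r := (splitKeepends statement.toList []).foldl sepStep ([], [], false)
  (String.ofList (PySem.Chars.join [] r.1), String.ofList (PySem.Chars.join [] r.2.1))

-- ===== PORT B =====
-- the inner while loop of Source B: take one line (keepends) off the front of the raw text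
def takeLine : List Char → List Char × List Char
  | [] => ([], [])
  | '\r' :: '\n' :: rest => (['\r', '\n'], rest)
  | '\n' :: rest => (['\n'], rest)
  | '\r' :: rest => (['\r'], rest)
  | c :: rest =>
      let p := takeLine rest
      (c :: p.1, p.2)

theorem takeLine_snd_lt : ∀ (c : Char) (rest : List Char),
    (takeLine (c :: rest)).2.length < (c :: rest).length := by
  intro c rest
  induction rest generalizing c with
  | nil =>
    by_cases hc : c = '\r' ∨ c = '\n'
    · rcases hc with h | h <;> subst h <;> simp [takeLine]
    · rw [not_or] at hc; simp [takeLine, hc.1, hc.2]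
  | cons d rest ih =>
    by_cases hc : c = '\r' ∨ c = '\n'
    · rcases hc with h | h <;> subst h
      · by_cases hd : d = '\n'
        · subst hd; simp [takeLine]
        · simp [takeLine, hd]
      · simp [takeLine]
    · rw [not_or] at hc
      have : takeLine (c :: d :: rest) = (c :: (takeLine (d :: rest)).1, (takeLine (d :: rest)).2) := by
        simp [takeLine, hc.1, hc.2]
      rw [this]
      have := ih d
      simpa using Nat.lt_succ_of_lt this

-- Source B's break test: s and not s.startswith('%')
def isCoreLine (line : List Char) : Bool :=
  let s := PySem.Chars.strip line
  !s.isEmpty && !PySem.Chars.startswith s ['%']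

-- Source B's outer while loop: the character index j of the prefix/core boundary
def boundary : List Char → Nat
  | [] => 0
  | c :: rest =>
      let p := takeLine (c :: rest)
      if isCoreLine p.1 then 0 else p.1.length + boundary p.2
  termination_by cs => cs.length
  decreasing_by exact takeLine_snd_lt c rest

def separate_prefix_alt (statement : String) : String × String :=
  let cs := statement.toList
  let j := boundary cs
  (String.ofList (cs.take j), String.ofList (cs.drop j))

-- ===== PRECONDITION & SPEC =====
def Spec_separate_prefix (statement : String) (out : String × String) : Prop := out = separate_prefix_alt statement
instance (statement : String) (out : String × String) : Decidable (Spec_separate_prefix statement out) := by unfold Spec_separate_prefix; infer_instance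

-- ===== CLAIM (what is proved, stated in full; the proofs are below) =====
def Claim_equal_separate_prefix : Prop := ∀ (statement : String), Dom_separate_prefix statement → Spec_separate_prefix statement (separate_prefix statement)

-- ===== LEMMAS AND PROOFS =====

-- the per-line prefix test of A: line.strip() is empty or starts with '%'
def isPrefixLine (line : List Char) : Bool :=
  let stripped := PySem.Chars.strip line
  stripped.isEmpty || PySem.Chars.startswith stripped ['%']

theorem isCoreLine_eq (line : List Char) : isCoreLine line = !isPrefixLine line := by
  simp [isCoreLine, isPrefixLine]

-- once found_content is set, every remaining line goes to core
theorem foldl_sepStep_found (lines : List (List Char)) (pre core : List (List Char)) :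
    lines.foldl sepStep (pre, core, true) = (pre, core ++ lines, true) := by
  induction lines generalizing core with
  | nil => simp
  | cons l ls ih => simp [sepStep, ih]

-- with the flag unset and core empty, A's loop computes the takeWhile/dropWhile split
theorem foldl_sepStep_span (lines : List (List Char)) (pre : List (List Char)) :
    lines.foldl sepStep (pre, [], false) =
      (pre ++ lines.takeWhile isPrefixLine, lines.dropWhile isPrefixLine,
        !(lines.dropWhile isPrefixLine).isEmpty) := by
  induction lines generalizing pre with
  | nil => simp
  | cons l ls ih =>
    by_cases h : isPrefixLine l = true
    · have : sepStep (pre, [], false) l = (pre ++ [l], [], false) := by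
        simp [sepStep, isPrefixLine] at h ⊢
        intro h'
        rcases h with h | h
        · exact absurd h h'
        · exact h
      simp [List.foldl_cons, this, ih, h]
    · have hb : isPrefixLine l = false := by simpa using h
      have : sepStep (pre, [], false) l = (pre, [l], true) := by
        simp [sepStep, isPrefixLine] at hb ⊢
        exact hb
      simp [List.foldl_cons, this, foldl_sepStep_found, hb]

theorem takeLine_append : ∀ cs : List Char, (takeLine cs).1 ++ (takeLine cs).2 = cs := by
  intro cs
  induction cs with
  | nil => simp [takeLine]
  | cons c rest ih =>
    by_cases hc : c = '\r' ∨ c = '\n'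
    · rcases hc with h | h <;> subst h
      · cases rest with
        | nil => simp [takeLine]
        | cons d rest' =>
          by_cases hd : d = '\n'
          · subst hd; simp [takeLine]
          · simp [takeLine, hd]
      · simp [takeLine]
    · rw [not_or] at hc
      have : takeLine (c :: rest) = (c :: (takeLine rest).1, (takeLine rest).2) := by
        cases rest with
        | nil => simp [takeLine, hc.1, hc.2]
        | cons d rest' => simp [takeLine, hc.1, hc.2]
      rw [this]; simpa using ih

-- splitKeepends peels exactly the line takeLine peels
theorem splitKeepends_eq : ∀ (cs acc : List Char), ¬(cs = [] ∧ acc = []) →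
    splitKeepends cs acc =
      (acc.reverse ++ (takeLine cs).1) :: splitKeepends (takeLine cs).2 [] := by
  intro cs
  induction cs with
  | nil =>
    intro acc h
    simp [takeLine, splitKeepends]
    simp at h
    simp [h]
  | cons c rest ih =>
    intro acc _
    by_cases hc : c = '\r' ∨ c = '\n'
    · rcases hc with h | h <;> subst h
      · cases rest with
        | nil => simp [takeLine, splitKeepends]
        | cons d rest' =>
          by_cases hd : d = '\n'
          · subst hd; simp [takeLine, splitKeepends]
          · simp [takeLine, splitKeepends, hd]
      · simp [takeLine, splitKeepends]
    · rw [not_or] at hc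
      have ht : takeLine (c :: rest) = (c :: (takeLine rest).1, (takeLine rest).2) := by
        cases rest with
        | nil => simp [takeLine, hc.1, hc.2]
        | cons d rest' => simp [takeLine, hc.1, hc.2]
      have hs : splitKeepends (c :: rest) acc = splitKeepends rest (c :: acc) := by
        cases rest with
        | nil => simp [splitKeepends, hc.1, hc.2]
        | cons d rest' => simp [splitKeepends, hc.1, hc.2]
      rw [hs, ih (c :: acc) (by simp), ht]
      simp

theorem join_nil_cons (l : List Char) (ls : List (List Char)) :
    PySem.Chars.join [] (l :: ls) = l ++ PySem.Chars.join [] ls := by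
  cases ls <;> simp [PySem.Chars.join, List.intercalate]

theorem join_splitKeepends : ∀ (n : Nat) (cs : List Char), cs.length ≤ n →
    PySem.Chars.join [] (splitKeepends cs []) = cs := by
  intro n
  induction n with
  | zero =>
    intro cs h
    have hnil : cs = [] := by cases cs <;> simp_all
    rw [hnil]; simp [splitKeepends, PySem.Chars.join, List.intercalate]
  | succ n ih =>
    intro cs h
    cases cs with
    | nil => simp [splitKeepends, PySem.Chars.join, List.intercalate]
    | cons c rest =>
      rw [splitKeepends_eq (c :: rest) [] (by simp), join_nil_cons,
        ih _ (by have := takeLine_snd_lt c rest; simp at h this ⊢; omega)]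
      simpa using takeLine_append (c :: rest)

-- B's boundary index cuts the text exactly where A's bucket split cuts it
theorem boundary_take_drop : ∀ (n : Nat) (cs : List Char), cs.length ≤ n →
    PySem.Chars.join [] ((splitKeepends cs []).takeWhile isPrefixLine) = cs.take (boundary cs) ∧
    PySem.Chars.join [] ((splitKeepends cs []).dropWhile isPrefixLine) = cs.drop (boundary cs) := by
  intro n
  induction n with
  | zero =>
    intro cs h
    have hnil : cs = [] := by cases cs <;> simp_all
    rw [hnil]; simp [splitKeepends, boundary, PySem.Chars.join, List.intercalate]
  | succ n ih =>
    intro cs h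
    cases cs with
    | nil => simp [splitKeepends, boundary, PySem.Chars.join, List.intercalate]
    | cons c rest =>
      have hLR := takeLine_append (c :: rest)
      have hlt := takeLine_snd_lt c rest
      have hle : (takeLine (c :: rest)).2.length ≤ n := by simp at h hlt; omega
      rw [splitKeepends_eq (c :: rest) [] (by simp), boundary]
      rcases hT : takeLine (c :: rest) with ⟨L, R⟩
      rw [hT] at hLR hle
      simp only [List.reverse_nil, List.nil_append]
      cases hp : isPrefixLine L with
      | false =>
        have hc : isCoreLine L = true := by rw [isCoreLine_eq, hp]; rfl
        constructor
        · simp [hp, hc, PySem.Chars.join, List.intercalate]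
        · simp only [List.dropWhile_cons, hp, Bool.false_eq_true, if_false, hc, ite_true, List.drop_zero]
          rw [join_nil_cons, join_splitKeepends n _ hle]
          exact hLR
      | true =>
        have hc : isCoreLine L = false := by rw [isCoreLine_eq, hp]; rfl
        have hih := ih R hle
        constructor
        · simp only [List.takeWhile_cons, hp, ite_true, hc, Bool.false_eq_true, ite_false]
          rw [join_nil_cons, hih.1, ← hLR]
          simp [List.take_append]
        · simp only [List.dropWhile_cons, hp, ite_true, hc, Bool.false_eq_true, ite_false]
          rw [hih.2, ← hLR]
          simp [List.drop_append]

-- ===== VERDICT (by name: the statement is the Claim_ definition above) =====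
theorem separate_prefix_spec : Claim_equal_separate_prefix := by
  intro statement _
  unfold Spec_separate_prefix separate_prefix separate_prefix_alt
  have h := boundary_take_drop statement.toList.length statement.toList le_rfl
  rw [foldl_sepStep_span]
  simp [h.1, h.2]
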